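-- pv_equiv track=rewrite | github.com/RamananVr/Leetcodepython | tree/2673_make_costs_of_paths_equal_in_a_binary_tree.py | minIncrementsBottomUp
-- ===== SOURCE A (Python) =====
-- from typing import List
-- import math
--
-- def minIncrementsBottomUp(n: int, cost: List[int]) -> int:
--     """
--     Bottom-up approach with clear level processing.
--
--     Time: O(n)
--     Space: O(1)
--     """
--     # Make a copy to avoid modifying input
--     costs = cost[:]
--     total_increments = 0
--
--     # Number of levels in the tree
--     levels = int(math.log2(n + 1))
--
--     # Process from second-to-last level up to root
--     for level in range(levels - 2, -1, -1):
--         level_start = 2 ** level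
--         level_end = min(2 ** (level + 1), n + 1)
--
--         for node in range(level_start, level_end):
--             if node * 2 <= n:  # Has children
--                 left_child = node * 2
--                 right_child = node * 2 + 1
--
--                 if right_child <= n:  # Both children exist
--                     left_cost = costs[left_child - 1]
--                     right_cost = costs[right_child - 1]
--
--                     # Add increments needed
--                     total_increments += abs(left_cost - right_cost)
--
--                     # Update parent to include max child cost
--                     costs[node - 1] += max(left_cost, right_cost)
--
--     return total_increments
-- ===== SOURCE B (Python) =====
-- def minIncrementsBottomUp(n, cost):
--     """Recursive post-order DFS over the perfect-tree prefix (levels full levels)."""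
--     levels = (n + 1).bit_length() - 1
--     if levels <= 1:
--         return 0
--
--     def dfs(node, h):
--         if h == 1:
--             return cost[node - 1], 0
--         lp, lt = dfs(2 * node, h - 1)
--         rp, rt = dfs(2 * node + 1, h - 1)
--         return cost[node - 1] + max(lp, rp), lt + rt + abs(lp - rp)
--
--     return dfs(1, levels)[1]
-- ===== Notes on version B (the rewrite author's own statement) =====
-- stated objective: simpler
-- what changed: Replaced A's imperative bottom-up level-by-level loop with in-place cost mutation by a short recursive post-order DFS over the perfect-tree prefix that returns (max path, increments) per subtree and mutates nothing.
import Mathlib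
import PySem

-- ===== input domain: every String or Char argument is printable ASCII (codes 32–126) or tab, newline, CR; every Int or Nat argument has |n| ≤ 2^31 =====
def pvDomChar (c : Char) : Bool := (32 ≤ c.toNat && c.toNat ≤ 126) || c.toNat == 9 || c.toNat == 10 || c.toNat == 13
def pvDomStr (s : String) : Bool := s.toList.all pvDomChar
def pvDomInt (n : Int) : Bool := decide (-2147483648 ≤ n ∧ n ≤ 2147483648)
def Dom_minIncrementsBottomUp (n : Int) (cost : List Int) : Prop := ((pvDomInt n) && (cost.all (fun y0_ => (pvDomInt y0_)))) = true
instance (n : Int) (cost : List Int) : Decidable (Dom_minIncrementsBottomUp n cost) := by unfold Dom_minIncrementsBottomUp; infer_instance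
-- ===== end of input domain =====

-- B replaces A's imperative bottom-up level loop (mutating a copy of cost) by a recursive
-- post-order DFS over the perfect-tree prefix; equal return value, neither port mutates anything.


-- ===== PORT A =====
-- A-side helper: the body of A's inner `for node in range(level_start, level_end)` loop.
-- costs[...] reads/writes are pyGetD/pySetD: in range under Pre_, exactly Python's behaviour there.
def pvBodyA (n : Int) (st : List Int × Int) (node : Int) : List Int × Int :=
  if node * 2 ≤ n then
    let left_child := node * 2
    let right_child := node * 2 + 1
    if right_child ≤ n then
      let left_cost := PySem.List.pyGetD st.1 (left_child - 1) 0
      let right_cost := PySem.List.pyGetD st.1 (right_child - 1) 0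
      (PySem.List.pySetD st.1 (node - 1) (PySem.List.pyGetD st.1 (node - 1) 0 + max left_cost right_cost),
       st.2 + |left_cost - right_cost|)
    else st
  else st

-- A-side helper: one iteration of A's outer `for level in range(levels - 2, -1, -1)` loop
def pvInnerA (n : Int) (st : List Int × Int) (level : Int) : List Int × Int :=
  let level_start : Int := 2 ^ level.toNat
  let level_end : Int := min (2 ^ (level + 1).toNat) (n + 1)
  (PySem.List.pyRange level_start level_end 1).foldl (pvBodyA n) st

-- `int(math.log2(n + 1))` equals ⌊log₂(n+1)⌋ exactly for 1 ≤ n+1 ≤ 2^31 + 1 (the Dom_ range);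
-- it is ported as Nat.log 2 (n+1).toNat.  (Python A copies `cost` and mutates only the copy.)
def minIncrementsBottomUp (n : Int) (cost : List Int) : Int :=
  let levels : Int := (Nat.log 2 (n + 1).toNat : Int)
  ((PySem.List.pyRange (levels - 2) (-1) (-1)).foldl (pvInnerA n) (cost, 0)).2

-- ===== PORT B =====
-- B-side helper: `dfs(node, h)` returning (max root-to-leaf path sum, increments inside the subtree)
def pvDfs (cost : List Int) (node : Int) : Nat → Int × Int
  | 0 => (0, 0)  -- unreachable: dfs is only ever called with h ≥ 1
  | 1 => (PySem.List.pyGetD cost (node - 1) 0, 0)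
  | h + 2 =>
      let l := pvDfs cost (2 * node) (h + 1)
      let r := pvDfs cost (2 * node + 1) (h + 1)
      (PySem.List.pyGetD cost (node - 1) 0 + max l.1 r.1, l.2 + r.2 + |l.1 - r.1|)

def minIncrementsBottomUp_alt (n : Int) (cost : List Int) : Int :=
  let levels : Int := (PySem.Int.bitLength (n + 1) : Int) - 1
  if levels ≤ 1 then 0 else (pvDfs cost 1 levels.toNat).2

-- ===== PRECONDITION & SPEC =====
-- Pre_ is exactly where A returns normally: n < 0 makes math.log2(n+1) raise ValueError, and for
-- n > 2 (a tree with more than one processed level) A reads cost[0 .. 2^L − 2] with L = ⌊log₂(n+1)⌋,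
-- raising IndexError when cost is shorter than 2^L − 1.
def Pre_minIncrementsBottomUp (n : Int) (cost : List Int) : Prop :=
  0 ≤ n ∧ (2 < n → (2 ^ Nat.log 2 (n + 1).toNat - 1 : Nat) ≤ cost.length)
instance (n : Int) (cost : List Int) : Decidable (Pre_minIncrementsBottomUp n cost) := by
  unfold Pre_minIncrementsBottomUp; infer_instance

def pvWitness_minIncrementsBottomUp : Int × List Int := (3, [1, 5, 3])

def Spec_minIncrementsBottomUp (n : Int) (cost : List Int) (out : Int) : Prop := out = minIncrementsBottomUp_alt n cost
instance (n : Int) (cost : List Int) (out : Int) : Decidable (Spec_minIncrementsBottomUp n cost out) := by unfold Spec_minIncrementsBottomUp; infer_instance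

-- ===== CLAIM (what is proved, stated in full; the proofs are below) =====
def Claim_equal_minIncrementsBottomUp : Prop := ∀ (n : Int) (cost : List Int), Dom_minIncrementsBottomUp n cost → Pre_minIncrementsBottomUp n cost → Spec_minIncrementsBottomUp n cost (minIncrementsBottomUp n cost)

-- ===== LEMMAS AND PROOFS =====

-- Abbreviation for an in-range list read, as both ports perform it.
def pvPg (c : List Int) (i : Int) : Int := PySem.List.pyGetD c i 0

lemma pvPg_set (c : List Int) (i j : Int) (v : Int) (h0 : 0 ≤ i) (h1 : i < (c.length : Int))
    (hj : 0 ≤ j) : pvPg (PySem.List.pySetD c i v) j = if j = i then v else pvPg c j := by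
  obtain ⟨iN, rfl⟩ : ∃ k : Nat, i = (k : Int) := ⟨i.toNat, by omega⟩
  obtain ⟨jN, rfl⟩ : ∃ k : Nat, j = (k : Int) := ⟨j.toNat, by omega⟩
  rw [PySem.List.pySetD_of_nonneg c v h0]
  unfold pvPg
  simp only [Int.toNat_natCast, PySem.List.pyGetD_natCast]
  simp only [List.getD, List.getElem?_set]
  split_ifs with h2 h3 h3 <;> simp_all

-- pvBodyA with both `if` guards true
lemma pvBodyA_of_guards (n : Int) (st : List Int × Int) (node : Int)
    (h1 : node * 2 ≤ n) (h2 : node * 2 + 1 ≤ n) :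
    pvBodyA n st node =
      (PySem.List.pySetD st.1 (node - 1)
         (pvPg st.1 (node - 1)
           + max (pvPg st.1 (node * 2 - 1)) (pvPg st.1 (node * 2 + 1 - 1))),
       st.2 + |pvPg st.1 (node * 2 - 1) - pvPg st.1 (node * 2 + 1 - 1)|) := by
  unfold pvBodyA pvPg
  rw [if_pos h1, if_pos h2]

lemma pvDfs_succ (c : List Int) (m : Int) (h : Nat) (hh : 1 ≤ h) :
    pvDfs c m (h + 1) =
      (PySem.List.pyGetD c (m - 1) 0 + max (pvDfs c (2 * m) h).1 (pvDfs c (2 * m + 1) h).1,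
       (pvDfs c (2 * m) h).2 + (pvDfs c (2 * m + 1) h).2
         + |(pvDfs c (2 * m) h).1 - (pvDfs c (2 * m + 1) h).1|) := by
  match h, hh with
  | h' + 1, _ => rfl

lemma pvSum_pairing (N : Nat) (g : Nat → Int) :
    ((List.range (2 * N)).map g).sum
      = ((List.range N).map (fun j => g (2 * j) + g (2 * j + 1))).sum := by
  induction N with
  | zero => rfl
  | succ N ih =>
      have h2 : 2 * (N + 1) = (2 * N) + 1 + 1 := by ring
      rw [h2, List.range_succ, List.range_succ, List.range_succ]
      simp [ih]

lemma pvBitLength_eq (n : Int) (hn : 0 ≤ n) :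
    (PySem.Int.bitLength (n + 1) : Int) - 1 = (Nat.log 2 (n + 1).toNat : Int) := by
  set BL := PySem.Int.bitLength (n + 1) with hBL
  have hne : n + 1 ≠ 0 := by omega
  have habs : (n + 1).natAbs = (n + 1).toNat := by omega
  have h1 : 2 ^ (BL - 1) ≤ (n + 1).toNat := by
    rw [← habs]; exact PySem.Int.two_pow_bitLength_le _ hne
  have h2 : (n + 1).toNat < 2 ^ BL := by
    rw [← habs]; exact PySem.Int.lt_two_pow_bitLength _
  have hBL1 : 1 ≤ BL := by
    by_contra hc
    have : BL = 0 := by omega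
    rw [this] at h2
    omega
  have : Nat.log 2 ((n + 1).toNat) = BL - 1 := by
    apply Nat.log_eq_of_pow_le_of_lt_pow h1
    have : BL - 1 + 1 = BL := by omega
    rw [this]; exact h2
  rw [this]
  omega

-- What A's inner loop over nodes [E−cnt, E) does: every guard fires, each node's slot gains the
-- max of its children's slots (all writes lie below all reads), and the |left − right| gaps add up.
lemma pvInner_go (n : Int) (E : Int) (hn : 2 * E ≤ n + 1) :
    ∀ (cnt : Nat) (c : List Int) (t : Int), 2 * (cnt : Int) ≤ E → E - 1 ≤ (c.length : Int) →
    (∀ j : Int, 0 ≤ j → (j < E - cnt - 1 ∨ E - 1 ≤ j) →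
        pvPg ((PySem.List.pyRange (E - cnt) E 1).foldl (pvBodyA n) (c, t)).1 j = pvPg c j)
    ∧ (∀ m : Int, E - cnt ≤ m → m < E →
        pvPg ((PySem.List.pyRange (E - cnt) E 1).foldl (pvBodyA n) (c, t)).1 (m - 1)
          = pvPg c (m - 1) + max (pvPg c (2 * m - 1)) (pvPg c (2 * m)))
    ∧ ((PySem.List.pyRange (E - cnt) E 1).foldl (pvBodyA n) (c, t)).2
        = t + ((PySem.List.pyRange (E - cnt) E 1).map
                 (fun m => |pvPg c (2 * m - 1) - pvPg c (2 * m)|)).sum := by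
  intro cnt
  induction cnt with
  | zero =>
      intro c t _ _
      rw [PySem.List.pyRange_one_eq_nil (by omega)]
      refine ⟨fun j _ _ => rfl, fun m hm hm' => absurd (lt_of_le_of_lt hm hm') (by omega), by simp⟩
  | succ k ih =>
      intro c t hcnt hlen
      have hk : 2 * (k : Int) ≤ E := by push_cast at hcnt ⊢; omega
      have ha0 : (0:Int) < E - (k+1) := by push_cast at hcnt ⊢; omega
      set a : Int := E - (↑(k+1) : Int) with haa
      have haE : a < E := by omega
      have hcons : PySem.List.pyRange a E 1 = a :: PySem.List.pyRange (a + 1) E 1 :=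
        PySem.List.pyRange_one_cons haE
      have hguard1 : a * 2 ≤ n := by omega
      have hguard2 : a * 2 + 1 ≤ n := by omega
      have hbody := pvBodyA_of_guards n (c, t) a hguard1 hguard2
      set v : Int := pvPg c (a - 1) + max (pvPg c (a * 2 - 1)) (pvPg c (a * 2 + 1 - 1)) with hv
      set c1 : List Int := PySem.List.pySetD c (a - 1) v with hc1
      set t1 : Int := t + |pvPg c (a * 2 - 1) - pvPg c (a * 2 + 1 - 1)| with ht1
      have hstep : (PySem.List.pyRange a E 1).foldl (pvBodyA n) (c, t)
          = (PySem.List.pyRange (a + 1) E 1).foldl (pvBodyA n) (c1, t1) := by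
        rw [hcons, List.foldl_cons, hbody]
      have hEa1 : E - (k : Int) = a + 1 := by omega
      have ihs := ih c1 t1 hk (by rwa [hc1, PySem.List.length_pySetD])
      rw [hEa1] at ihs
      obtain ⟨ih1, ih2, ih3⟩ := ihs
      have hset : ∀ j : Int, 0 ≤ j → j ≠ a - 1 → pvPg c1 j = pvPg c j := by
        intro j hj hne
        rw [hc1, pvPg_set c (a-1) j v (by omega) (by omega) hj, if_neg hne]
      refine ⟨?_, ?_, ?_⟩
      · intro j hj hcase
        rw [hstep]
        have := ih1 j hj (by omega)
        rw [this, hset j hj (by omega)]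
      · intro m hm hmE
        rw [hstep]
        by_cases hma : m = a
        · rw [hma]
          have h1 := ih1 (a - 1) (by omega) (by omega)
          rw [h1, hc1, pvPg_set c (a-1) (a-1) v (by omega) (by omega) (by omega), if_pos rfl, hv]
          have e1 : a * 2 - 1 = 2 * a - 1 := by ring
          have e2 : a * 2 + 1 - 1 = 2 * a := by ring
          rw [e1, e2]
        · have hm1 : a + 1 ≤ m := by omega
          have := ih2 m hm1 hmE
          rw [this, hset (m-1) (by omega) (by omega), hset (2*m-1) (by omega) (by omega),
              hset (2*m) (by omega) (by omega)]
      · rw [hstep, ih3, hcons, List.map_cons, List.sum_cons]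
        have hmapeq : (PySem.List.pyRange (a+1) E 1).map (fun m => |pvPg c1 (2*m-1) - pvPg c1 (2*m)|)
            = (PySem.List.pyRange (a+1) E 1).map (fun m => |pvPg c (2*m-1) - pvPg c (2*m)|) := by
          apply List.map_congr_left
          intro m hmem
          rw [PySem.List.mem_pyRange_one] at hmem
          rw [hset (2*m-1) (by omega) (by omega), hset (2*m) (by omega) (by omega)]
        rw [hmapeq, ht1]
        have e1 : a * 2 - 1 = 2 * a - 1 := by ring
        rw [e1]
        have e2 : a * 2 + 1 - 1 = 2 * a := by ring
        rw [e2]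
        ring

-- Loop invariant of A's outer loop: after the levels below `lev` have been folded in, slot m−1 of a
-- level-`lev` node m holds the max path sum of its height-(L−lev) subtree, lower slots are pristine,
-- and the accumulator is the sum of the increments inside all level-`lev` subtrees.
def pvInv (cost : List Int) (L lev : Nat) (st : List Int × Int) : Prop :=
  (∀ i : Int, 0 ≤ i → i < 2 ^ lev - 1 → pvPg st.1 i = pvPg cost i)
  ∧ (∀ m : Int, (2 : Int) ^ lev ≤ m → m < 2 ^ (lev + 1) → pvPg st.1 (m - 1) = (pvDfs cost m (L - lev)).1)
  ∧ st.2 = ((List.range (2 ^ lev)).map (fun j => (pvDfs cost ((2 ^ lev + j : Nat) : Int) (L - lev)).2)).sum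

lemma pvStep (n : Int) (cost : List Int) (L lev : Nat) (hlev : lev + 2 ≤ L)
    (hN : (2 : Int) ^ L ≤ n + 1) (hlen : (2 : Int) ^ L - 1 ≤ (cost.length : Int))
    (st : List Int × Int) (hst : st.1.length = cost.length)
    (hInv : pvInv cost L (lev + 1) st) :
    pvInv cost L lev (pvInnerA n st (lev : Int)) := by
  obtain ⟨inv1, inv2, inv3⟩ := hInv
  -- replace the powers of two by an atom P so that omega can reason about them
  obtain ⟨P, hP⟩ : ∃ P : Int, (2:Int) ^ lev = P := ⟨_, rfl⟩
  have hP0 : 1 ≤ P := hP ▸ one_le_pow₀ (by norm_num)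
  have hP1 : (2:Int) ^ (lev + 1) = 2 * P := by rw [pow_succ, hP]; ring
  have hP2 : (2:Int) ^ (lev + 1 + 1) = 4 * P := by rw [pow_succ, hP1]; ring
  have hPL : 4 * P ≤ (2:Int) ^ L := by
    rw [← hP2]; exact pow_le_pow_right₀ (by norm_num) (by omega)
  set sN : Nat := 2 ^ lev with hsNdef
  have hsN : ((sN : Nat) : Int) = P := by rw [hsNdef, ← hP]; push_cast; ring
  rw [hP1] at inv1
  rw [hP1, hP2] at inv2
  have hh1 : 1 ≤ L - (lev + 1) := by omega
  have hsub : L - lev = (L - (lev + 1)) + 1 := by omega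
  set h : Nat := L - (lev + 1) with hhdef
  -- the inner loop unfolds to a fold over the node range [P, 2P)
  have hlt : ((lev : Int)).toNat = lev := by omega
  have hlt1 : ((lev : Int) + 1).toNat = lev + 1 := by omega
  have hmin : min ((2:Int) ^ (lev+1)) (n + 1) = (2:Int) ^ (lev+1) := by
    apply min_eq_left; rw [hP1]; omega
  have hunf : pvInnerA n st (lev : Int)
      = (PySem.List.pyRange P (2 * P) 1).foldl (pvBodyA n) (st.1, st.2) := by
    unfold pvInnerA
    rw [hlt, hlt1, hmin, hP, hP1]
  -- apply pvInner_go with E = 2P, cnt = sN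
  have hE : 2 * P - ((sN : Nat) : Int) = P := by rw [hsN]; ring
  have hgo := pvInner_go n (2 * P) (by omega) sN st.1 st.2
      (by rw [hsN]) (by rw [hst]; omega)
  rw [hE] at hgo
  obtain ⟨g1, g2, g3⟩ := hgo
  refine ⟨?_, ?_, ?_⟩
  · intro i hi hilt
    rw [hP] at hilt
    rw [hunf, g1 i hi (by omega)]
    exact inv1 i hi (by omega)
  · intro m hm hmE
    rw [hP] at hm; rw [hP1] at hmE
    rw [hunf, g2 m hm hmE]
    have e1 : pvPg st.1 (m - 1) = pvPg cost (m - 1) := inv1 (m-1) (by omega) (by omega)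
    have e2 : pvPg st.1 (2*m - 1) = (pvDfs cost (2*m) h).1 :=
      inv2 (2*m) (by omega) (by omega)
    have e3 : pvPg st.1 (2*m) = (pvDfs cost (2*m+1) h).1 := by
      simpa using inv2 (2*m+1) (by omega) (by omega)
    rw [e1, e2, e3, hsub, pvDfs_succ cost m _ hh1]
    simp [pvPg]
  · rw [hunf, g3, inv3]
    have h1 : 2 * P - P = ((sN : Nat) : Int) := by rw [hsN]; ring
    have hrange := PySem.List.pyRange_one P (2 * P)
    rw [h1, Int.toNat_natCast] at hrange
    set g : Nat → Int := fun j => (pvDfs cost ((2 ^ (lev+1) + j : Nat) : Int) h).2 with hg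
    set eN : Nat → Int := fun j =>
      |(pvDfs cost ((2 ^ (lev+1) + 2*j : Nat) : Int) h).1
        - (pvDfs cost ((2 ^ (lev+1) + (2*j+1) : Nat) : Int) h).1| with he
    -- (a) target sum termwise = child pairs + gaps
    have ha : (List.range sN).map (fun j => (pvDfs cost ((2 ^ lev + j : Nat) : Int) (L - lev)).2)
        = (List.range sN).map (fun j => (g (2*j) + g (2*j+1)) + eN j) := by
      apply List.map_congr_left
      intro j hj
      rw [hsub, pvDfs_succ cost _ _ hh1, hg, he]
      have c1 : 2 * ((2 ^ lev + j : Nat) : Int) = ((2 ^ (lev+1) + 2*j : Nat) : Int) := by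
        push_cast; ring
      have c2 : 2 * ((2 ^ lev + j : Nat) : Int) + 1 = ((2 ^ (lev+1) + (2*j+1) : Nat) : Int) := by
        push_cast; ring
      rw [c2, c1]
    -- (b) split the sum
    have hb : ((List.range sN).map (fun j => (g (2*j) + g (2*j+1)) + eN j)).sum
        = ((List.range sN).map (fun j => g (2*j) + g (2*j+1))).sum
          + ((List.range sN).map eN).sum := PySem.List.sum_map_add_int _ _ _
    -- (c) pairing: the level-(lev+1) sum regrouped into sibling pairs
    have hc : ((List.range (2 ^ (lev+1))).map g).sum
        = ((List.range sN).map (fun j => g (2*j) + g (2*j+1))).sum := by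
      have h2N : (2 ^ (lev + 1) : Nat) = 2 * sN := by rw [hsNdef]; ring
      rw [h2N, pvSum_pairing]
    -- (d) the |·| sum over the node range equals the gap sum
    have hd : ((PySem.List.pyRange P (2 * P) 1).map
          (fun m => |pvPg st.1 (2 * m - 1) - pvPg st.1 (2 * m)|)).sum
        = ((List.range sN).map eN).sum := by
      rw [hrange, List.map_map]
      apply congrArg
      apply List.map_congr_left
      intro j hj
      have hjN : j < sN := List.mem_range.mp hj
      have hjI : (j : Int) < P := by rw [← hsN]; exact_mod_cast hjN
      simp only [Function.comp_apply, he]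
      have e2 : pvPg st.1 (2 * (P + (j:Int)) - 1)
          = (pvDfs cost ((2 ^ (lev+1) + 2*j : Nat) : Int) h).1 := by
        have := inv2 ((2 ^ (lev+1) + 2*j : Nat) : Int)
          (by push_cast [hP1]; omega) (by push_cast [hP1]; omega)
        rw [← this]; congr 1; push_cast [hP1]; ring
      have e3 : pvPg st.1 (2 * (P + (j:Int)))
          = (pvDfs cost ((2 ^ (lev+1) + (2*j+1) : Nat) : Int) h).1 := by
        have := inv2 (((2 ^ (lev+1) + (2*j+1) : Nat) : Int))
          (by push_cast [hP1]; omega) (by push_cast [hP1]; omega)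
        have harg : (((2 ^ (lev+1) + (2*j+1) : Nat) : Int)) - 1 = 2 * (P + (j:Int)) := by
          push_cast [hP1]; ring
        rw [harg] at this
        rw [this]
      rw [e2, e3]
    rw [ha, hb, ← hc, hd]

lemma pvBodyA_length (n : Int) (st : List Int × Int) (node : Int) :
    (pvBodyA n st node).1.length = st.1.length := by
  unfold pvBodyA
  dsimp only
  split_ifs <;> simp [PySem.List.length_pySetD]

lemma pvFold_length (n : Int) (ns : List Int) (st : List Int × Int) :
    ((ns.foldl (pvBodyA n) st).1).length = st.1.length := by
  induction ns generalizing st with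
  | nil => rfl
  | cons x xs ih => rw [List.foldl_cons, ih, pvBodyA_length]

lemma pvInnerA_length (n : Int) (st : List Int × Int) (level : Int) :
    (pvInnerA n st level).1.length = st.1.length := by
  unfold pvInnerA
  exact pvFold_length n _ st

lemma pvLoop (n : Int) (cost : List Int) (L : Nat) (hN : (2 : Int) ^ L ≤ n + 1)
    (hlen : (2 : Int) ^ L - 1 ≤ (cost.length : Int)) :
    ∀ (lev : Nat) (st : List Int × Int), lev + 1 ≤ L → st.1.length = cost.length →
      pvInv cost L lev st →
      ((PySem.List.pyRange ((lev : Int) - 1) (-1) (-1)).foldl (pvInnerA n) st).2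
        = (pvDfs cost 1 L).2 := by
  intro lev
  induction lev with
  | zero =>
      intro st _ _ hInv
      rw [PySem.List.pyRange_neg_one_eq_nil (by norm_num)]
      simpa using hInv.2.2
  | succ lev ih =>
      intro st hle hst hInv
      have hcast : ((lev + 1 : Nat) : Int) - 1 = (lev : Int) := by push_cast; ring
      rw [hcast, PySem.List.pyRange_neg_one_cons (by omega), List.foldl_cons]
      exact ih (pvInnerA n st (lev : Int))
        (by omega)
        (by rw [pvInnerA_length, hst])
        (pvStep n cost L lev (by omega) hN hlen st hst hInv)

-- ===== VERDICT (by name: the statement is the Claim_ definition above) =====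
theorem minIncrementsBottomUp_spec : Claim_equal_minIncrementsBottomUp := by
  intro n cost _ hPre
  obtain ⟨hn0, hlenPre⟩ := hPre
  unfold Spec_minIncrementsBottomUp
  set L : Nat := Nat.log 2 (n + 1).toNat with hLdef
  have hBL : (PySem.Int.bitLength (n + 1) : Int) - 1 = (L : Int) := pvBitLength_eq n hn0
  have hA : minIncrementsBottomUp n cost
      = ((PySem.List.pyRange ((L : Int) - 2) (-1) (-1)).foldl (pvInnerA n) (cost, 0)).2 := rfl
  have hB : minIncrementsBottomUp_alt n cost
      = if ((PySem.Int.bitLength (n + 1) : Int) - 1) ≤ 1 then 0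
        else (pvDfs cost 1 ((PySem.Int.bitLength (n + 1) : Int) - 1).toNat).2 := rfl
  rw [hA, hB, hBL]
  by_cases hL1 : L ≤ 1
  · rw [if_pos (by exact_mod_cast hL1)]
    rw [PySem.List.pyRange_neg_one_eq_nil (by omega)]
    rfl
  · rw [if_neg (by omega)]
    have hL2 : 2 ≤ L := by omega
    -- basic bounds
    have hNnat : 2 ^ L ≤ (n + 1).toNat := Nat.pow_log_le_self 2 (by omega)
    have hN : (2 : Int) ^ L ≤ n + 1 := by
      have := hNnat
      have hc : ((2 ^ L : Nat) : Int) = (2:Int) ^ L := by push_cast; ring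
      omega
    have hn2 : 2 < n := by
      have h4 : (4 : Int) ≤ (2:Int) ^ L := by
        calc (4:Int) = 2 ^ 2 := by norm_num
        _ ≤ 2 ^ L := pow_le_pow_right₀ (by norm_num) hL2
      omega
    have hlenNat : (2 ^ L - 1 : Nat) ≤ cost.length := hlenPre hn2
    have hlen : (2 : Int) ^ L - 1 ≤ (cost.length : Int) := by
      have hc : ((2 ^ L : Nat) : Int) = (2:Int) ^ L := by push_cast; ring
      have h1 : (1:Nat) ≤ 2 ^ L := Nat.one_le_two_pow
      omega
    -- initial invariant at the leaf level L−1
    have hInv0 : pvInv cost L (L - 1) (cost, 0) := by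
      refine ⟨fun i _ _ => rfl, ?_, ?_⟩
      · intro m _ _
        have : L - (L - 1) = 1 := by omega
        rw [this]
        rfl
      · have : L - (L - 1) = 1 := by omega
        rw [this]
        simp [pvDfs]
    have hcast : (L : Int) - 2 = ((L - 1 : Nat) : Int) - 1 := by
      push_cast [Nat.cast_sub (by omega : 1 ≤ L)]
      ring
    rw [hcast]
    have hTopNat : ((L : Int)).toNat = L := by omega
    rw [hTopNat]
    exact pvLoop n cost L hN hlen (L - 1) (cost, 0) (by omega) rfl hInv0
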